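-- pv_equiv track=rewrite | github.com/yunsaijc/TechManagement | src/services/plagiarism/engine.py | _map_normalized_suffix_to_original_end
-- ===== SOURCE A (Python) =====
-- def _map_normalized_suffix_to_original_end(text: str, normalized_suffix_len: int) -> int:
--     if normalized_suffix_len <= 0:
--         return len(text)
--
--     count = 0
--     for idx in range(len(text) - 1, -1, -1):
--         if text[idx].isspace():
--             continue
--         count += 1
--         if count >= normalized_suffix_len:
--             return idx
--     return 0
-- ===== SOURCE B (Python) =====
-- def _map_normalized_suffix_to_original_end(text: str, normalized_suffix_len: int) -> int:
--     if normalized_suffix_len <= 0: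
--         return len(text)
--     idxs = [i for i, ch in enumerate(text) if not ch.isspace()]
--     if len(idxs) >= normalized_suffix_len:
--         return idxs[-normalized_suffix_len]
--     return 0
-- ===== Notes on version B (the rewrite author's own statement) =====
-- stated objective: alternative
-- what changed: Replaced the backward early-exit counting scan with a single forward pass that collects all non-whitespace indices and then answers by direct negative indexing into that table.
import Mathlib
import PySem

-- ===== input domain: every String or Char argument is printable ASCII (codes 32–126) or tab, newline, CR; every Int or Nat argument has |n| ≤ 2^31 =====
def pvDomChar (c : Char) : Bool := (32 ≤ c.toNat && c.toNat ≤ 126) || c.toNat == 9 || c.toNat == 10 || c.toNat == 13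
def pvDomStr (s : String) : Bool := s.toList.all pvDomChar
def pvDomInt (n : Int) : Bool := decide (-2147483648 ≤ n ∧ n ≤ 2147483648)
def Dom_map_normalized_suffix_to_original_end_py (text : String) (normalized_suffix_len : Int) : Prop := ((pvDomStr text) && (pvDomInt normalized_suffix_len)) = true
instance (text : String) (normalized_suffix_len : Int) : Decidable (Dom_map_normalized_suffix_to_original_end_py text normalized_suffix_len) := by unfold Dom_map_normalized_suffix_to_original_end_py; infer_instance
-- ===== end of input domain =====

-- B replaces A's backward early-exit counting scan by one forward pass collecting all
-- non-whitespace indices, then answers by direct negative indexing (objective: alternative).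

-- ===== PORT A =====
-- the backward 'for idx in range(len(text)-1, -1, -1)' loop with the running count
def pvALoop (cs : List Char) (k : Int) : List Int → Int → Int
  | [], _ => 0
  | idx :: rest, count =>
    if PySem.Chars.isspace (PySem.List.pyGetD cs idx ' ') then
      pvALoop cs k rest count
    else if count + 1 ≥ k then idx
    else pvALoop cs k rest (count + 1)

def map_normalized_suffix_to_original_end_py (text : String) (normalized_suffix_len : Int) : Int :=
  if normalized_suffix_len ≤ 0 then PySem.Str.len text
  else pvALoop text.toList normalized_suffix_len
        (PySem.List.pyRange (PySem.Str.len text - 1) (-1) (-1)) 0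

-- ===== PORT B =====
def map_normalized_suffix_to_original_end_py_alt (text : String) (normalized_suffix_len : Int) : Int :=
  if normalized_suffix_len ≤ 0 then PySem.Str.len text
  else
    let idxs := ((PySem.List.enumerate text.toList).filter
                  (fun p => !(PySem.Chars.isspace p.2))).map (·.1)
    if normalized_suffix_len ≤ (idxs.length : Int) then
      -- the guard ensures idxs[-k] is in range, so the Python indexing never raises
      (PySem.List.pyGet? idxs (-normalized_suffix_len)).getD 0
    else 0

-- ===== PRECONDITION & SPEC =====
def Spec_map_normalized_suffix_to_original_end_py (text : String) (normalized_suffix_len : Int) (out : Int) : Prop := out = map_normalized_suffix_to_original_end_py_alt text normalized_suffix_len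
instance (text : String) (normalized_suffix_len : Int) (out : Int) : Decidable (Spec_map_normalized_suffix_to_original_end_py text normalized_suffix_len out) := by unfold Spec_map_normalized_suffix_to_original_end_py; infer_instance

-- ===== CLAIM (what is proved, stated in full; the proofs are below) =====
def Claim_equal_map_normalized_suffix_to_original_end_py : Prop := ∀ (text : String) (normalized_suffix_len : Int), Dom_map_normalized_suffix_to_original_end_py text normalized_suffix_len → Spec_map_normalized_suffix_to_original_end_py text normalized_suffix_len (map_normalized_suffix_to_original_end_py text normalized_suffix_len)

-- ===== LEMMAS AND PROOFS =====

theorem pv_enumerate_append {α : Type} (xs ys : List α) (s : Int) :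
    PySem.List.enumerate (xs ++ ys) s
      = PySem.List.enumerate xs s ++ PySem.List.enumerate ys (s + xs.length) := by
  induction xs generalizing s with
  | nil => simp [PySem.List.enumerate_nil]
  | cons x xs ih =>
      simp [PySem.List.enumerate_cons, ih]
      ring_nf

-- helper: the filtered index table of a prefix
def pvIdxs (cs : List Char) (m : Nat) : List Int :=
  ((PySem.List.enumerate (cs.take m)).filter (fun p => !(PySem.Chars.isspace p.2))).map (·.1)

theorem pvALoop_eq (cs : List Char) (k : Int) (m : Nat) (hm : m ≤ cs.length)
    (count : Int) (h0 : 0 ≤ count) (hk : count < k) :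
    pvALoop cs k (PySem.List.pyRange ((m : Int) - 1) (-1) (-1)) count
      = (if k - count ≤ ((pvIdxs cs m).length : Int) then
           (pvIdxs cs m).getD ((pvIdxs cs m).length - (k - count).toNat) 0
         else 0) := by
  induction m generalizing count with
  | zero =>
      rw [PySem.List.pyRange_neg_one_eq_nil (by norm_num)]
      simp [pvALoop, pvIdxs, PySem.List.enumerate_nil]
  | succ m ih =>
      have hm' : m ≤ cs.length := Nat.le_of_succ_le hm
      have hmc : m < cs.length := hm
      rw [show ((m + 1 : Nat) : Int) - 1 = (m : Int) by push_cast; ring,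
          PySem.List.pyRange_neg_one_cons (by omega)]
      have hget : PySem.List.pyGetD cs (m : Int) ' ' = cs[m] :=
        PySem.List.pyGetD_ofNat cs m ' ' hmc
      have htake : cs.take (m + 1) = cs.take m ++ [cs[m]] := by
        rw [List.take_add_one]
        simp [List.getElem?_eq_getElem hmc]
      have hlen : (List.take m cs).length = m := List.length_take_of_le hm'
      have hidxs : pvIdxs cs (m + 1) =
          if PySem.Chars.isspace cs[m] then pvIdxs cs m
          else pvIdxs cs m ++ [(m : Int)] := by
        unfold pvIdxs
        rw [htake, pv_enumerate_append, List.filter_append, List.map_append]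
        by_cases hsp : PySem.Chars.isspace cs[m]
        · simp [PySem.List.enumerate_cons, PySem.List.enumerate_nil, hsp]
        · simp [PySem.List.enumerate_cons, PySem.List.enumerate_nil, hsp, hlen]
      simp only [pvALoop, hget]
      by_cases hsp : PySem.Chars.isspace cs[m]
      · simp only [hsp, if_true, hidxs]
        exact ih hm' count h0 hk
      · simp only [hsp, if_false, hidxs, Bool.false_eq_true]
        have hL : ((pvIdxs cs m ++ [(m : Int)]).length : Int) = ((pvIdxs cs m).length : Int) + 1 := by
          simp
        have hLn : (pvIdxs cs m ++ [(m : Int)]).length = (pvIdxs cs m).length + 1 := by simp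
        by_cases hlast : count + 1 ≥ k
        · -- k - count = 1 : A returns m, the last collected index
          have hk1 : k - count = 1 := by omega
          simp only [hlast, if_true]
          rw [if_pos (by rw [hL]; omega)]
          have hix : (pvIdxs cs m ++ [(m : Int)]).length - (k - count).toNat
              = (pvIdxs cs m).length := by rw [hLn]; omega
          rw [hix, List.getD_eq_getElem?_getD]
          simp
        · -- k - count ≥ 2 : recurse, the appended last element is irrelevant
          have hk2 : 2 ≤ k - count := by omega
          simp only [hlast, if_false]
          rw [ih hm' (count + 1) (by omega) (by omega)]
          by_cases hle : k - count ≤ ((pvIdxs cs m).length : Int) + 1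
          · rw [if_pos (by omega : k - (count+1) ≤ ((pvIdxs cs m).length : Int)), if_pos (by rw [hL]; omega)]
            have hix : (pvIdxs cs m ++ [(m : Int)]).length - (k - count).toNat
                = (pvIdxs cs m).length - (k - (count + 1)).toNat := by rw [hLn]; omega
            rw [hix]
            have hlt : (pvIdxs cs m).length - (k - (count + 1)).toNat < (pvIdxs cs m).length := by
              omega
            rw [List.getD_eq_getElem?_getD, List.getD_eq_getElem?_getD,
                List.getElem?_append_left hlt]
          · rw [if_neg (by omega : ¬ k - (count+1) ≤ ((pvIdxs cs m).length : Int)), if_neg (by rw [hL]; omega)]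

-- ===== VERDICT (by name: the statement is the Claim_ definition above) =====
theorem map_normalized_suffix_to_original_end_py_spec : Claim_equal_map_normalized_suffix_to_original_end_py := by
  intro text k _
  unfold Spec_map_normalized_suffix_to_original_end_py
  unfold map_normalized_suffix_to_original_end_py map_normalized_suffix_to_original_end_py_alt
  by_cases hk : k ≤ 0
  · simp [hk]
  · simp only [hk, if_false]
    have hk' : 0 < k := by omega
    have hlen : PySem.Str.len text = (text.toList.length : Int) := by
      simp [PySem.Str.len]
    rw [hlen, pvALoop_eq text.toList k text.toList.length le_rfl 0 le_rfl hk']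
    set idxs := pvIdxs text.toList text.toList.length with hidxs
    have hidxs' : ((PySem.List.enumerate text.toList).filter
        (fun p => !(PySem.Chars.isspace p.2))).map (·.1) = idxs := by
      have htk : List.take text.length text.toList = text.toList := by
        have : text.length = text.toList.length := by simp
        rw [this]; exact List.take_of_length_le le_rfl
      simp [hidxs, pvIdxs, htk]
    simp only [hidxs']
    by_cases hle : k ≤ (idxs.length : Int)
    · rw [if_pos (by omega), if_pos hle]
      have hknat : 0 < k.toNat ∧ k.toNat ≤ idxs.length := by omega
      rw [show -k = -(k.toNat : Int) by omega,
          PySem.List.pyGet?_neg_natCast idxs k.toNat hknat.1 hknat.2]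
      rw [List.getD_eq_getElem?_getD]
      simp
    · rw [if_neg (by omega), if_neg hle]
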